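-- pv_equiv track=rewrite | github.com/VictoryNo1/soulmate | dealData.py | counter_beauty
-- ===== SOURCE A (Python) =====
-- def counter_beauty(beauties):
-- 	res = []
-- 	for beauty in beauties:
-- 		res.append(int(int(beauty) / 10))
--
-- 	r = {}
-- 	for i in range(10):
-- 		key = '{}-{}'.format(i, i+1)
-- 		num = res.count(i)
-- 		if num > 0:
-- 			r.update({str(key): num})
--
-- 	return r
-- ===== SOURCE B (Python) =====
-- def counter_beauty(beauties):
--     # sort the bins, then one run-length scan over the sorted list emits
--     # each distinct in-range bin (ascending) with the length of its run
--     bins = sorted(int(int(beauty) / 10) for beauty in beauties)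
--     r = {}
--     prev = None
--     run = 0
--     for b in bins:
--         if b == prev:
--             run += 1
--         else:
--             if prev is not None and 0 <= prev < 10:
--                 r['{}-{}'.format(prev, prev + 1)] = run
--             prev = b
--             run = 1
--     if prev is not None and 0 <= prev < 10:
--         r['{}-{}'.format(prev, prev + 1)] = run
--     return r
-- ===== Notes on version B (the rewrite author's own statement) =====
-- stated objective: alternative
-- what changed: B sorts the bin values once and emits the result in a single run-length scan over the sorted list (each maximal run of one in-range bin becomes one dict entry), instead of A's intermediate bin list scanned ten times by .count over range(10); the exact int(int(beauty)/10) binning and the silent drop of out-of-range bins are kept.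
import Mathlib
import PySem

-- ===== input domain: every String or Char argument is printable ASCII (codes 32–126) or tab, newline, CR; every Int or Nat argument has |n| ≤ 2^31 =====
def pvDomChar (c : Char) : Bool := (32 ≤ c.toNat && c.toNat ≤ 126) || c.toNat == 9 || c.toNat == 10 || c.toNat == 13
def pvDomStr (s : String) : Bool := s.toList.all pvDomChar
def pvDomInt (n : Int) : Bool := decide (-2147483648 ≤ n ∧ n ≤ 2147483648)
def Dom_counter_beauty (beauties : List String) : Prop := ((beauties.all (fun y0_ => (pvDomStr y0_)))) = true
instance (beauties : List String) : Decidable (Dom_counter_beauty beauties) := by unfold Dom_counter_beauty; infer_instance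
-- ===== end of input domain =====

-- B sorts the bins once and emits the dict in a single run-length scan over the sorted list,
-- instead of A's intermediate bin list scanned ten times by .count (objective: alternative).

-- ===== PORT A =====
def counter_beauty (beauties : List String) : List (String × Int) :=
  -- res.append(int(int(beauty) / 10)): float true division then int() truncates toward zero.
  -- PySem.Int.truncdiv is that truncation computed exactly; float rounding can differ from it
  -- only for |int(beauty)| ≥ 2^53, whose bin lies far outside 0..9 under either division, so
  -- every count res.count(i), i in 0..9, and hence the returned dict, is exact for all inputs
  -- A returns on. ofStr? = none is a ValueError, excluded by Pre_ (getD 0 is never reached).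
  let res : List Int :=
    beauties.foldl (fun acc beauty =>
      acc ++ [PySem.Int.truncdiv ((PySem.Int.ofStr? beauty).getD 0) 10]) []
  let r : PySem.Dict String Int :=
    (PySem.List.pyRange 0 10).foldl (fun r i =>
      let key := PySem.Int.toStr i ++ "-" ++ PySem.Int.toStr (i + 1)
      let num : Int := (PySem.List.count res i : Int)
      if num > 0 then r.insert key num else r) PySem.Dict.empty
  r.items

-- ===== PORT B =====
-- state of the run-length scan: (r, prev, run); prev = none models Python's prev = None
def counter_beauty_alt (beauties : List String) : List (String × Int) :=
  -- same binning expression as A's port; the same exactness comment applies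
  let bins : List Int :=
    PySem.List.sorted
      (beauties.map (fun beauty => PySem.Int.truncdiv ((PySem.Int.ofStr? beauty).getD 0) 10))
      (fun x => x)
  let st : PySem.Dict String Int × Option Int × Int :=
    bins.foldl (fun st b =>
      let (r, prev, run) := st
      if prev = some b then (r, prev, run + 1)
      else
        let r' := match prev with
          | some p =>
              if 0 ≤ p ∧ p < 10 then
                r.insert (PySem.Int.toStr p ++ "-" ++ PySem.Int.toStr (p + 1)) run
              else r
          | none => r
        (r', some b, 1)) (PySem.Dict.empty, none, 0)
  let r : PySem.Dict String Int :=
    match st.2.1 with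
    | some p =>
        if 0 ≤ p ∧ p < 10 then
          st.1.insert (PySem.Int.toStr p ++ "-" ++ PySem.Int.toStr (p + 1)) st.2.2
        else st.1
    | none => st.1
  r.items

-- ===== PRECONDITION & SPEC =====
-- Pre_ excludes exactly the inputs on which A raises: strings int() rejects (ValueError) and
-- parsed values with |n| ≥ 10*(2^1024 - 2^970), where int(n)/10 overflows a float
-- (OverflowError); on every other input A returns.
-- pvOvfBound = 10*(2^1024 - 2^970) - 1, the largest |n| for which int(n)/10 does not overflow
def pvOvfBound : Int := 1797693134862315807937289714053034150799341327100378269361737789804449682927647509466490179775872070963302864166928879109465555478519404026306574886715058206819089020007083836762738548458177115317644757302700698555713669596228429148198608349364752927190741684443655107043427115596995080930428801779041744977919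

def Pre_counter_beauty (beauties : List String) : Prop :=
  beauties.all (fun beauty =>
    (PySem.Int.ofStr? beauty).elim false
      (fun n => decide (-pvOvfBound ≤ n ∧ n ≤ pvOvfBound))) = true
instance (beauties : List String) : Decidable (Pre_counter_beauty beauties) := by
  unfold Pre_counter_beauty; infer_instance

def pvWitness_counter_beauty : List String := ["15", "-3", " 100", "7", "+19", "12"]

def Spec_counter_beauty (beauties : List String) (out : List (String × Int)) : Prop := out = counter_beauty_alt beauties
instance (beauties : List String) (out : List (String × Int)) : Decidable (Spec_counter_beauty beauties out) := by unfold Spec_counter_beauty; infer_instance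

-- ===== CLAIM (what is proved, stated in full; the proofs are below) =====
def Claim_equal_counter_beauty : Prop := ∀ (beauties : List String), Dom_counter_beauty beauties → Pre_counter_beauty beauties → Spec_counter_beauty beauties (counter_beauty beauties)

-- ===== LEMMAS AND PROOFS =====

-- bin of one input string and the label of bin i ('{}-{}'.format(i, i+1))
def pvBin (s : String) : Int := PySem.Int.truncdiv ((PySem.Int.ofStr? s).getD 0) 10
def pvKey (i : Int) : String := PySem.Int.toStr i ++ "-" ++ PySem.Int.toStr (i + 1)

-- first-occurrence deduplication (proof-only helper; structural recursion)
def pvDdup : List Int → List Int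
  | [] => []
  | a :: t => a :: (pvDdup t).filter (fun x => x ≠ a)

theorem pvDdup_sublist (l : List Int) : (pvDdup l).Sublist l := by
  induction l with
  | nil => simp [pvDdup]
  | cons a t ih =>
      exact List.Sublist.cons₂ a (List.filter_sublist.trans ih)

theorem mem_pvDdup (l : List Int) (x : Int) : x ∈ pvDdup l ↔ x ∈ l := by
  induction l with
  | nil => simp [pvDdup]
  | cons a t ih =>
      simp only [pvDdup, List.mem_cons, List.mem_filter, ih, decide_eq_true_eq]
      by_cases hx : x = a <;> simp [hx]

theorem pvDdup_nodup (l : List Int) : (pvDdup l).Nodup := by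
  induction l with
  | nil => simp [pvDdup]
  | cons a t ih =>
      refine List.Nodup.cons ?_ (List.Nodup.filter _ ih)
      intro h
      have := (List.mem_filter.1 h).2
      simp at this

theorem pvKey_inj_on (a b : Int) (ha0 : 0 ≤ a) (ha : a < 10) (hb0 : 0 ≤ b) (hb : b < 10)
    (h : pvKey a = pvKey b) : a = b := by
  interval_cases a <;> interval_cases b <;> revert h <;> decide

-- ===== A side: items of A's dict as a filtered map over range(10) =====
theorem counter_beauty_eq (beauties : List String) :
    counter_beauty beauties =
      ((PySem.List.pyRange 0 10).filter
          (fun i => decide ((PySem.List.count (beauties.map pvBin) i : Int) > 0))).map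
        (fun i => (pvKey i, (PySem.List.count (beauties.map pvBin) i : Int))) := by
  simp only [counter_beauty, pvKey]
  rw [PySem.List.foldl_append_singleton_eq_map
      (f := fun beauty => PySem.Int.truncdiv ((PySem.Int.ofStr? beauty).getD 0) 10),
    List.nil_append]
  rw [PySem.List.foldl_ite_eq_foldl_filter]
  rw [PySem.Dict.items_foldl_insert_fresh _
      (fun i => PySem.Int.toStr i ++ "-" ++ PySem.Int.toStr (i + 1)) _ PySem.Dict.empty
      (by intro a _; simp [pysem])
      (by
        refine List.Sublist.nodup (List.Sublist.map _ List.filter_sublist) ?_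
        decide)]
  rfl

-- ===== B side: the run-length fold =====

-- one step of B's fold
def pvStep (st : PySem.Dict String Int × Option Int × Int) (b : Int) :
    PySem.Dict String Int × Option Int × Int :=
  let (r, prev, run) := st
  if prev = some b then (r, prev, run + 1)
  else
    let r' := match prev with
      | some p => if 0 ≤ p ∧ p < 10 then r.insert (pvKey p) run else r
      | none => r
    (r', some b, 1)

def pvEmit (r : PySem.Dict String Int) (p : Int) (c : Int) : PySem.Dict String Int :=
  if 0 ≤ p ∧ p < 10 then r.insert (pvKey p) c else r

def pvFinish (st : PySem.Dict String Int × Option Int × Int) : PySem.Dict String Int :=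
  match st.2.1 with
  | some p => pvEmit st.1 p st.2.2
  | none => st.1

-- the fold over a sorted tail, started mid-run: invariant lemma
theorem pvFold_run (s : List Int) (r : PySem.Dict String Int) (p : Int) (run : Int)
    (hs : s.Pairwise (· ≤ ·)) (hp : ∀ x ∈ s, p ≤ x) :
    pvFinish (s.foldl pvStep (r, some p, run)) =
      (((pvDdup s).filter (fun x => x ≠ p)).foldl
          (fun r q => pvEmit r q (PySem.List.count s q : Int))
          (pvEmit r p (run + (PySem.List.count s p : Int)))) := by
  induction s generalizing r p run with
  | nil => simp [pvFinish, pvDdup, PySem.List.count, pvEmit]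
  | cons a t ih =>
      have hta : ∀ x ∈ t, a ≤ x := fun x hx => (List.pairwise_cons.1 hs).1 x hx
      have ht : t.Pairwise (· ≤ ·) := (List.pairwise_cons.1 hs).2
      by_cases hap : a = p
      · subst hap
        have hstep : pvStep (r, some a, run) a = (r, some a, run + 1) := by
          simp [pvStep]
        rw [List.foldl_cons, hstep, ih r a (run + 1) ht hta]
        have hc : (PySem.List.count (a :: t) a : Int) = (PySem.List.count t a : Int) + 1 := by
          simp [PySem.List.count]
        have hd : (pvDdup (a :: t)).filter (fun x => x ≠ a)
            = (pvDdup t).filter (fun x => x ≠ a) := by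
          simp [pvDdup, List.filter_filter]
        rw [hc, hd]
        have harg : run + 1 + (PySem.List.count t a : Int)
            = run + ((PySem.List.count t a : Int) + 1) := by ring
        rw [harg]
        refine PySem.List.foldl_congr_mem _ _ _ _ ?_
        intro acc q hq
        have hqa : q ≠ a := by
          have := (List.mem_filter.1 hq).2; simpa using this
        have : PySem.List.count (a :: t) q = PySem.List.count t q := by
          simp [PySem.List.count, Ne.symm hqa]
        rw [this]
      · have hpa : p < a := lt_of_le_of_ne (hp a (List.mem_cons_self)) (Ne.symm hap)
        have hstep : pvStep (r, some p, run) a = (pvEmit r p run, some a, 1) := by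
          simp [pvStep, pvEmit, Ne.symm hap]
        rw [List.foldl_cons, hstep, ih (pvEmit r p run) a 1 ht hta]
        have hpnot : ∀ x ∈ a :: t, p ≠ x := by
          intro x hx
          rcases List.mem_cons.1 hx with h | h
          · subst h; exact fun he => hap he.symm
          · exact ne_of_lt (lt_of_lt_of_le hpa (hta x h))
        have hcp : (PySem.List.count (a :: t) p : Int) = 0 := by
          have : p ∉ a :: t := fun h => hpnot p h rfl
          simp [PySem.List.count, List.count_eq_zero.2 this]
        rw [hcp, add_zero]
        have hfilter : (pvDdup (a :: t)).filter (fun x => x ≠ p)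
            = a :: (pvDdup t).filter (fun x => x ≠ a) := by
          have : ∀ x ∈ pvDdup (a :: t), x ≠ p := by
            intro x hx
            exact fun he => hpnot x ((mem_pvDdup _ _).1 hx) he.symm
          rw [List.filter_eq_self.2 (by intro x hx; simpa using this x hx)]
          rfl
        rw [hfilter, List.foldl_cons]
        have hca : (PySem.List.count (a :: t) a : Int) = 1 + (PySem.List.count t a : Int) := by
          simp [PySem.List.count]; ring
        rw [hca]
        refine PySem.List.foldl_congr_mem _ _ _ _ ?_
        intro acc q hq
        have hqa : q ≠ a := by
          have := (List.mem_filter.1 hq).2; simpa using this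
        have : PySem.List.count (a :: t) q = PySem.List.count t q := by
          simp [PySem.List.count, Ne.symm hqa]
        rw [this]

-- whole fold: items of B's dict as a filtered map over the deduplicated sorted bins
theorem pvFold_whole (s : List Int) (hs : s.Pairwise (· ≤ ·)) :
    pvFinish (s.foldl pvStep (PySem.Dict.empty, none, 0)) =
      (pvDdup s).foldl (fun r q => pvEmit r q (PySem.List.count s q : Int)) PySem.Dict.empty := by
  cases s with
  | nil => simp [pvFinish, pvDdup]
  | cons a t =>
      have hta : ∀ x ∈ t, a ≤ x := fun x hx => (List.pairwise_cons.1 hs).1 x hx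
      have ht : t.Pairwise (· ≤ ·) := (List.pairwise_cons.1 hs).2
      have hstep : pvStep (PySem.Dict.empty, none, 0) a
          = (PySem.Dict.empty, some a, 1) := by simp [pvStep]
      rw [List.foldl_cons, hstep, pvFold_run t PySem.Dict.empty a 1 ht hta]
      have hca : (PySem.List.count (a :: t) a : Int) = 1 + (PySem.List.count t a : Int) := by
        simp [PySem.List.count]; ring
      rw [show pvDdup (a :: t) = a :: (pvDdup t).filter (fun x => x ≠ a) from rfl,
        List.foldl_cons, hca]
      refine PySem.List.foldl_congr_mem _ _ _ _ ?_
      intro acc q hq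
      have hqa : q ≠ a := by
        have := (List.mem_filter.1 hq).2; simpa using this
      have : PySem.List.count (a :: t) q = PySem.List.count t q := by
        simp [PySem.List.count, Ne.symm hqa]
      rw [this]

theorem counter_beauty_alt_eq (beauties : List String) :
    counter_beauty_alt beauties =
      ((pvDdup (PySem.List.sorted (beauties.map pvBin) (fun x => x))).filter
          (fun b => decide (0 ≤ b ∧ b < 10))).map
        (fun b => (pvKey b, (PySem.List.count (beauties.map pvBin) b : Int))) := by
  have halt : counter_beauty_alt beauties =
      (pvFinish ((PySem.List.sorted (beauties.map pvBin) (fun x => x)).foldl pvStep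
        (PySem.Dict.empty, none, 0))).items := by
    rfl
  set s := PySem.List.sorted (beauties.map pvBin) (fun x => x) with hsdef
  have hs : s.Pairwise (· ≤ ·) := PySem.List.sorted_pairwise _ _
  rw [halt, pvFold_whole s hs]
  have hcnt : ∀ q, PySem.List.count s q = PySem.List.count (beauties.map pvBin) q := by
    intro q
    exact List.Perm.count_eq (PySem.List.sorted_perm _ _ _) q
  have hfold : (pvDdup s).foldl (fun r q => pvEmit r q (PySem.List.count s q : Int))
      PySem.Dict.empty
      = (pvDdup s).foldl
          (fun r q => pvEmit r q (PySem.List.count (beauties.map pvBin) q : Int))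
          PySem.Dict.empty := by
    refine PySem.List.foldl_congr_mem _ _ _ _ ?_
    intro acc q _; rw [hcnt q]
  rw [hfold]
  simp only [pvEmit]
  rw [PySem.List.foldl_ite_eq_foldl_filter]
  rw [PySem.Dict.items_foldl_insert_fresh _ pvKey _ PySem.Dict.empty
      (by intro a _; simp [pysem])
      (by
        refine List.Nodup.map_on ?_ ?_
        · intro x hx y hy hxy
          have hx' := (List.mem_filter.1 hx).2
          have hy' := (List.mem_filter.1 hy).2
          simp only [decide_eq_true_eq] at hx' hy'
          exact pvKey_inj_on x y hx'.1 hx'.2 hy'.1 hy'.2 hxy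
        · exact List.Nodup.filter _ (pvDdup_nodup s))]
  rfl

-- the two index lists coincide
theorem filters_eq (beauties : List String) :
    ((pvDdup (PySem.List.sorted (beauties.map pvBin) (fun x => x))).filter
        (fun b => decide (0 ≤ b ∧ b < 10)))
      = ((PySem.List.pyRange 0 10).filter
        (fun i => decide ((PySem.List.count (beauties.map pvBin) i : Int) > 0))) := by
  set s := PySem.List.sorted (beauties.map pvBin) (fun x => x) with hsdef
  have hmem : ∀ x, x ∈ s ↔ x ∈ beauties.map pvBin :=
    fun x => (PySem.List.sorted_perm _ _ _).mem_iff
  have hnd1 : ((pvDdup s).filter (fun b => decide (0 ≤ b ∧ b < 10))).Nodup :=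
    List.Nodup.filter _ (pvDdup_nodup s)
  have hnd2 : ((PySem.List.pyRange 0 10).filter
      (fun i => decide ((PySem.List.count (beauties.map pvBin) i : Int) > 0))).Nodup :=
    List.Nodup.filter _ (by decide)
  refine PySem.List.eq_of_perm_of_pairwise_le_of_injective (fun x : Int => x)
    (fun _ _ h => h) ((List.perm_ext_iff_of_nodup hnd1 hnd2).2 ?_) ?_ ?_
  · intro a
    have hcnt : PySem.List.count (beauties.map pvBin) a
        = List.count a (beauties.map pvBin) := rfl
    constructor
    · intro h
      have h1 := (List.mem_filter.1 h).1
      have h2 := (List.mem_filter.1 h).2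
      simp only [decide_eq_true_eq] at h2
      have hmem' : a ∈ beauties.map pvBin := (hmem a).1 ((mem_pvDdup s a).1 h1)
      refine List.mem_filter.2 ⟨PySem.List.mem_pyRange_one.2 ⟨h2.1, h2.2⟩, ?_⟩
      simp only [decide_eq_true_eq, gt_iff_lt, hcnt]
      exact_mod_cast List.count_pos_iff.2 hmem'
    · intro h
      have h1 := PySem.List.mem_pyRange_one.1 (List.mem_filter.1 h).1
      have h2 := (List.mem_filter.1 h).2
      simp only [decide_eq_true_eq, gt_iff_lt, hcnt] at h2
      have hmem' : a ∈ beauties.map pvBin := List.count_pos_iff.1 (by exact_mod_cast h2)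
      refine List.mem_filter.2 ⟨?_, by simp only [decide_eq_true_eq]; exact h1⟩
      exact (mem_pvDdup s a).2 ((hmem a).2 hmem')
  · exact List.Pairwise.sublist List.filter_sublist
      (List.Pairwise.sublist (pvDdup_sublist s) (PySem.List.sorted_pairwise _ _))
  · exact List.Pairwise.sublist (l₂ := PySem.List.pyRange 0 10) List.filter_sublist (by decide)

-- ===== VERDICT =====
theorem counter_beauty_spec : Claim_equal_counter_beauty := by
  intro beauties _ _
  unfold Spec_counter_beauty
  rw [counter_beauty_eq, counter_beauty_alt_eq, filters_eq]
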